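-- pv_equiv track=rewrite | github.com/gagamaoz/Code-Portfolio | PicEdit.py | rectangle_select
-- ===== SOURCE A (Python) =====
-- def rectangle_select (image , topleft , bottomright):
--
--     topleftrow , topleftcolumn = topleft
--     bottomrightrow , bottomrightcolumn = bottomright
--
--     row = len(image)
--     col = len(image[0])
--
--     mask = []
--
--     for r in range(row):
--         mask.append([])
--     for r in range(row):
--         for c in range(col):
--             mask[r].append([])
--
--     for i in range(row):
--         if i not in range(topleftrow,bottomrightrow+1):
--             for j in range(col):
--                 mask[i][j] = 0
--         else:
--             for j in range(col):
--                 mask[i][j] = 1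
--
--     for j in range(col):
--         if j not in range(topleftcolumn,bottomrightcolumn+1):
--             for i in range(row):
--                 mask[i][j] = 0
--     return mask
-- ===== SOURCE B (Python) =====
-- def rectangle_select(image, topleft, bottomright):
--     tr, tc = topleft
--     br, bc = bottomright
--     nrows, ncols = len(image), len(image[0])
--     lo = max(0, min(tc, ncols))
--     hi = max(lo, min(bc + 1, ncols))
--     hit = [0] * lo + [1] * (hi - lo) + [0] * (ncols - hi)
--     return [hit[:] if tr <= i <= br else [0] * ncols for i in range(nrows)]
-- ===== Notes on version B (the rewrite author's own statement) =====
-- stated objective: faster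
-- what changed: Instead of allocating a placeholder grid and making three full row/column sweeps with a per-cell range-membership test, B clamps the rectangle bounds once, builds the single selected-row pattern by list concatenation and emits a copy of it (or a fresh zero row) per row.
import Mathlib
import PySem

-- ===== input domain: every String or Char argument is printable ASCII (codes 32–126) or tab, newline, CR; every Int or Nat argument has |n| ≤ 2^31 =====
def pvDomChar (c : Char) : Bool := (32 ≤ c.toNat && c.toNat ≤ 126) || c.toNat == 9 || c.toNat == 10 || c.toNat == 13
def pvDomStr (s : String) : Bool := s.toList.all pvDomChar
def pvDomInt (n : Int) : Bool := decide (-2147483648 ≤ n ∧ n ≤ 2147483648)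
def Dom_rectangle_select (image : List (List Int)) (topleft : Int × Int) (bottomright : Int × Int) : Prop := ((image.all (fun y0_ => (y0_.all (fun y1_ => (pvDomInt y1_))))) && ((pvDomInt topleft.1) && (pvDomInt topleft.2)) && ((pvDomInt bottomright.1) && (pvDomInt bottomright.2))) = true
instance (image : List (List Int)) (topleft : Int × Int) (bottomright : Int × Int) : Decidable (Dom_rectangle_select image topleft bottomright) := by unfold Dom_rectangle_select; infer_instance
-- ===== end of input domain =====

-- B replaces A's placeholder grid plus three full sweeps by clamping the rectangle once and
-- concatenating the single selected-row pattern; equal output on every non-empty image (Pre_).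


-- ===== PORT A =====
-- mask[i][j] = v  (indices come from range(...), hence nonnegative: toNat is exact there)
def pvSetCell (m : List (List Int)) (i j : Int) (v : Int) : List (List Int) :=
  m.set i.toNat ((m.getD i.toNat []).set j.toNat v)

def rectangle_select (image : List (List Int)) (topleft : Int × Int) (bottomright : Int × Int) : List (List Int) :=
  let tlr := topleft.1
  let tlc := topleft.2
  let brr := bottomright.1
  let brc := bottomright.2
  let row : Int := image.length
  -- len(image[0]); Python raises IndexError on an empty image — excluded by Pre_
  let col : Int := (((PySem.List.pyGet? image 0).getD []).length : Int)
  -- for r in range(row): mask.append([])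
  let mask : List (List Int) := (PySem.List.pyRange 0 row 1).foldl (fun m _ => m ++ [[]]) []
  -- for r in range(row): for c in range(col): mask[r].append([])
  -- Python's placeholder is the empty list []; every cell is overwritten by the loops below,
  -- so the placeholder is rendered here as 0 (the only gap from List (List Int) typing)
  let mask := (PySem.List.pyRange 0 row 1).foldl (fun m r =>
      (PySem.List.pyRange 0 col 1).foldl
        (fun m _ => m.set r.toNat ((m.getD r.toNat []) ++ [0])) m) mask
  -- for i in range(row): if i not in range(tlr, brr+1): zero the row else fill it with 1
  let mask := (PySem.List.pyRange 0 row 1).foldl (fun m i =>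
      if ¬ (tlr ≤ i ∧ i < brr + 1) then
        (PySem.List.pyRange 0 col 1).foldl (fun m j => pvSetCell m i j 0) m
      else
        (PySem.List.pyRange 0 col 1).foldl (fun m j => pvSetCell m i j 1) m) mask
  -- for j in range(col): if j not in range(tlc, brc+1): zero the column
  (PySem.List.pyRange 0 col 1).foldl (fun m j =>
      if ¬ (tlc ≤ j ∧ j < brc + 1) then
        (PySem.List.pyRange 0 row 1).foldl (fun m i => pvSetCell m i j 0) m
      else m) mask

-- ===== PORT B =====
def rectangle_select_alt (image : List (List Int)) (topleft : Int × Int) (bottomright : Int × Int) : List (List Int) :=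
  let tr := topleft.1
  let tc := topleft.2
  let br := bottomright.1
  let bc := bottomright.2
  let nrows : Int := image.length
  -- len(image[0]); raises on the empty image exactly as A does — excluded by Pre_
  let ncols : Int := (((PySem.List.pyGet? image 0).getD []).length : Int)
  let lo := max 0 (min tc ncols)
  let hi := max lo (min (bc + 1) ncols)
  let hit := List.replicate lo.toNat (0 : Int) ++ List.replicate (hi - lo).toNat 1 ++ List.replicate (ncols - hi).toNat 0
  (PySem.List.pyRange 0 nrows 1).map (fun i =>
    if tr ≤ i ∧ i ≤ br then hit else List.replicate ncols.toNat 0)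

-- ===== PRECONDITION & SPEC =====
-- Pre_ excludes only the empty image, on which both A and B raise IndexError at image[0].
def Pre_rectangle_select (image : List (List Int)) (topleft : Int × Int) (bottomright : Int × Int) : Prop := image ≠ []
instance (image : List (List Int)) (topleft : Int × Int) (bottomright : Int × Int) : Decidable (Pre_rectangle_select image topleft bottomright) := by unfold Pre_rectangle_select; infer_instance
def pvWitness_rectangle_select : List (List Int) × (Int × Int) × (Int × Int) := ([[5, 6], [7, 8]], (0, 1), (1, 1))

def Spec_rectangle_select (image : List (List Int)) (topleft : Int × Int) (bottomright : Int × Int) (out : List (List Int)) : Prop := out = rectangle_select_alt image topleft bottomright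
instance (image : List (List Int)) (topleft : Int × Int) (bottomright : Int × Int) (out : List (List Int)) : Decidable (Spec_rectangle_select image topleft bottomright out) := by unfold Spec_rectangle_select; infer_instance

-- ===== CLAIM (what is proved, stated in full; the proofs are below) =====
def Claim_equal_rectangle_select : Prop := ∀ (image : List (List Int)) (topleft : Int × Int) (bottomright : Int × Int), Dom_rectangle_select image topleft bottomright → Pre_rectangle_select image topleft bottomright → Spec_rectangle_select image topleft bottomright (rectangle_select image topleft bottomright)

-- ===== LEMMAS AND PROOFS =====

-- generic 'for k in range(n): m[k] = g k m[k]' loop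
def pvF {α : Type} (g : Nat → α → α) (d : α) (n : Nat) (m : List α) : List α :=
  (List.range n).foldl (fun m k => m.set k (g k (m.getD k d))) m

theorem pvF_succ {α : Type} (g : Nat → α → α) (d : α) (n : Nat) (m : List α) :
    pvF g d (n+1) m = (pvF g d n m).set n (g n ((pvF g d n m).getD n d)) := by
  simp [pvF, List.range_succ]

theorem pvF_length {α : Type} (g : Nat → α → α) (d : α) (n : Nat) (m : List α) :
    (pvF g d n m).length = m.length := by
  induction n with
  | zero => simp [pvF]
  | succ n ih => rw [pvF_succ]; simp [ih]

theorem pvF_getElem? {α : Type} (g : Nat → α → α) (d : α) (n : Nat) (m : List α) :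
    ∀ i, (pvF g d n m)[i]? = if i < n ∧ i < m.length then some (g i (m.getD i d)) else m[i]? := by
  induction n with
  | zero => intro i; simp [pvF]
  | succ n ih =>
    intro i
    have hlen := pvF_length g d n m
    have hn : (pvF g d n m)[n]? = m[n]? := by rw [ih n]; simp
    have hgd : (pvF g d n m).getD n d = m.getD n d := by
      simp only [List.getD_eq_getElem?_getD, hn]
    rw [pvF_succ, hgd, List.getElem?_set, hlen]
    by_cases h : n = i
    · subst h
      by_cases hl : n < m.length
      · simp [hl]
      · have hmn : m[n]? = none := List.getElem?_eq_none (by omega)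
        simp [hl, hmn]
    · rw [if_neg h, ih i]
      by_cases h1 : i < n
      · have h2 : i < n + 1 := by omega
        simp [h1, h2]
      · by_cases h3 : i < n + 1
        · have : i = n := by omega
          omega
        · simp [h1, h3]

theorem pvF_set_eq_map (n : Nat) (m : List (List Int)) (hn : m.length ≤ n)
    (f : List Int → List Int) :
    pvF (fun _ r => f r) ([] : List Int) n m = m.map f := by
  apply List.ext_getElem?
  intro i
  rw [pvF_getElem?, List.getElem?_map]
  by_cases h : i < m.length
  · simp [h, Nat.lt_of_lt_of_le h hn, List.getD_eq_getElem?_getD, List.getElem?_eq_getElem h]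
  · simp [List.getElem?_eq_none (by omega : m.length ≤ i), h]

-- inner loop 'for j in js: m[i][j] = v' rewrites to one row update
theorem pvInnerRow (i : Nat) (v : Int) (js : List Nat) :
    ∀ (m : List (List Int)),
      js.foldl (fun m j => m.set i ((m.getD i []).set j v)) m
        = m.set i (js.foldl (fun r j => r.set j v) (m.getD i [])) := by
  induction js with
  | nil =>
    intro m
    apply List.ext_getElem?
    intro k
    rw [List.getElem?_set]
    by_cases h : i = k
    · subst h
      by_cases hl : i < m.length
      · simp [hl, List.getD_eq_getElem?_getD, List.getElem?_eq_getElem hl]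
      · simp [hl, List.getElem?_eq_none (by omega : m.length ≤ i)]
    · simp [h]
  | cons j js ih =>
    intro m
    by_cases h : i < m.length
    · have hgd : (m.set i ((m.getD i []).set j v)).getD i [] = (m.getD i []).set j v := by
        simp [List.getD_eq_getElem?_getD, List.getElem?_set, h]
      rw [List.foldl_cons, ih, hgd, List.set_set]
      conv_rhs => rw [List.foldl_cons]
    · have hle : m.length ≤ i := by omega
      rw [List.foldl_cons, List.set_eq_of_length_le hle, ih,
        List.set_eq_of_length_le hle, List.set_eq_of_length_le hle]

-- inner loop 'for _ in js: m[i].append(z)' rewrites to one row update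
theorem pvInnerApp (i : Nat) (z : Int) (js : List Nat) :
    ∀ (m : List (List Int)),
      js.foldl (fun m _ => m.set i ((m.getD i []) ++ [z])) m
        = m.set i ((m.getD i []) ++ List.replicate js.length z) := by
  induction js with
  | nil =>
    intro m
    apply List.ext_getElem?
    intro k
    rw [List.getElem?_set]
    by_cases h : i = k
    · subst h
      by_cases hl : i < m.length
      · simp [hl, List.getD_eq_getElem?_getD, List.getElem?_eq_getElem hl]
      · simp [hl, List.getElem?_eq_none (by omega : m.length ≤ i)]
    · simp [h]
  | cons j js ih =>
    intro m
    by_cases h : i < m.length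
    · have hgd : (m.set i ((m.getD i []) ++ [z])).getD i [] = (m.getD i []) ++ [z] := by
        simp [List.getD_eq_getElem?_getD, List.getElem?_set, h]
      rw [List.foldl_cons, ih, hgd, List.set_set, List.append_assoc]
      simp [List.replicate_succ]
    · have hle : m.length ≤ i := by omega
      rw [List.foldl_cons, List.set_eq_of_length_le hle, ih,
        List.set_eq_of_length_le hle, List.set_eq_of_length_le hle]

-- the column-zeroing pass commutes to a per-row pass
theorem pvColLoop (P : Nat → Prop) [DecidablePred P] (n : Nat) (js : List Nat) :
    ∀ (m : List (List Int)), m.length ≤ n →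
      js.foldl (fun m j => if P j then pvF (fun _ r => r.set j 0) ([] : List Int) n m else m) m
        = m.map (fun r => js.foldl (fun r j => if P j then r.set j 0 else r) r) := by
  induction js with
  | nil => intro m _; simp
  | cons j js ih =>
    intro m hm
    rw [List.foldl_cons]
    have hstep : (if P j then pvF (fun _ r => r.set j 0) ([] : List Int) n m else m)
        = m.map (fun r => if P j then r.set j 0 else r) := by
      by_cases h : P j
      · simp only [if_pos h]; exact pvF_set_eq_map n m hm _
      · simp [h]
    rw [hstep, ih _ (by simpa using hm), List.map_map]
    apply List.map_congr_left
    intro r _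
    simp [Function.comp, List.foldl_cons]

theorem pvColLen (P : Nat → Prop) [DecidablePred P] :
    ∀ (n : Nat) (r : List Int),
      ((List.range n).foldl (fun r j => if P j then r.set j 0 else r) r).length = r.length := by
  intro n
  induction n with
  | zero => intro r; simp
  | succ n ih =>
    intro r
    rw [List.range_succ, List.foldl_append]
    by_cases h : P n <;> simp [h, ih]

theorem pvColRow (P : Nat → Prop) [DecidablePred P] :
    ∀ (n : Nat) (r : List Int) (k : Nat),
      ((List.range n).foldl (fun r j => if P j then r.set j 0 else r) r)[k]?
        = if k < n ∧ P k then (if k < r.length then some 0 else none) else r[k]? := by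
  intro n
  induction n with
  | zero => intro r k; simp
  | succ n ih =>
    intro r k
    rw [List.range_succ, List.foldl_append]
    simp only [List.foldl_cons, List.foldl_nil]
    by_cases h : P n
    · rw [if_pos h, List.getElem?_set, pvColLen]
      by_cases hk : n = k
      · subst hk
        have h1 : ¬ (n < n ∧ P n) := by omega
        have h2 : n < n + 1 ∧ P n := ⟨by omega, h⟩
        rw [ih, if_neg h1, if_pos h2]
        simp
      · rw [if_neg hk, ih]
        by_cases h1 : k < n
        · have h2 : k < n + 1 := by omega
          simp [h1, h2]
        · have h2 : ¬ (k < n ∧ P k) := by omega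
          have h3 : ¬ (k < n + 1 ∧ P k) := by
            rintro ⟨ha, hb⟩
            have : k = n := by omega
            exact hk this.symm
          rw [if_neg h2, if_neg h3]
    · rw [if_neg h, ih]
      by_cases h1 : k < n ∧ P k
      · have h2 : k < n + 1 ∧ P k := ⟨by omega, h1.2⟩
        rw [if_pos h1, if_pos h2]
      · have h2 : ¬ (k < n + 1 ∧ P k) := by
          rintro ⟨ha, hb⟩
          rcases Nat.lt_or_ge k n with hc | hc
          · exact h1 ⟨hc, hb⟩
          · have : k = n := by omega
            subst this
            exact h hb
        rw [if_neg h1, if_neg h2]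

theorem pvColFix (P : Nat → Prop) [DecidablePred P] (C : Nat) (v : Int) :
    (List.range C).foldl (fun r j => if P j then r.set j 0 else r) (List.replicate C v)
      = (List.range C).map (fun (j : Nat) => if P j then 0 else v) := by
  apply List.ext_getElem?
  intro k
  rw [pvColRow, List.getElem?_map]
  by_cases hk : k < C
  · rw [List.getElem?_range hk]
    by_cases hp : P k <;> simp [hk, hp]
  · have hr : (List.range C)[k]? = none := List.getElem?_eq_none (by simpa using Nat.le_of_not_lt hk)
    simp [hk, hr]

-- row fill with a constant over a full row
theorem pvFillRow (v : Int) (n : Nat) (r : List Int) (hr : r.length = n) :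
    (List.range n).foldl (fun r j => r.set j v) r = List.replicate n v := by
  have hf : (List.range n).foldl (fun r j => r.set j v) r = pvF (fun _ _ => v) 0 n r := rfl
  rw [hf]
  apply List.ext_getElem?
  intro i
  rw [pvF_getElem?]
  by_cases h : i < n
  · simp [h, hr]
  · simp [h, List.getElem?_eq_none (by omega : r.length ≤ i)]

theorem raw_stage0 (R : Nat) :
    (List.range R).foldl (fun m _ => m ++ [([] : List Int)]) [] = List.replicate R [] := by
  rw [PySem.List.foldl_append_singleton_eq_map (fun _ => ([] : List Int))]
  simp [List.map_const']

theorem raw_stage1 (R C : Nat) :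
    (List.range R).foldl (fun m r => m.set r ((m.getD r []) ++ List.replicate C (0:Int)))
        (List.replicate R [])
      = List.replicate R (List.replicate C 0) := by
  have hf : (List.range R).foldl (fun m r => m.set r ((m.getD r []) ++ List.replicate C (0:Int)))
      (List.replicate R []) = pvF (fun _ r => r ++ List.replicate C 0) [] R (List.replicate R []) := rfl
  rw [hf]
  apply List.ext_getElem?
  intro i
  rw [pvF_getElem?]
  by_cases h : i < R
  · simp [h, List.getD_eq_getElem?_getD]
  · simp [h]

theorem raw_stage2 (P : Nat → Prop) [DecidablePred P] (R C : Nat) :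
    (List.range R).foldl (fun m i =>
        if P i then m.set i ((List.range C).foldl (fun r j => r.set j (0:Int)) (m.getD i []))
        else m.set i ((List.range C).foldl (fun r j => r.set j 1) (m.getD i [])))
      (List.replicate R (List.replicate C 0))
      = (List.range R).map (fun (i : Nat) => List.replicate C (if P i then 0 else 1)) := by
  have hbody : (fun (m : List (List Int)) i =>
        if P i then m.set i ((List.range C).foldl (fun r j => r.set j (0:Int)) (m.getD i []))
        else m.set i ((List.range C).foldl (fun r j => r.set j 1) (m.getD i [])))
      = fun m i => m.set i ((fun i r => if P i then (List.range C).foldl (fun r j => r.set j (0:Int)) r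
          else (List.range C).foldl (fun r j => r.set j 1) r) i (m.getD i [])) := by
    funext m i
    by_cases h : P i <;> simp [h]
  rw [hbody]
  have hf : (List.range R).foldl (fun m i => m.set i ((fun i r =>
        if P i then (List.range C).foldl (fun r j => r.set j (0:Int)) r
        else (List.range C).foldl (fun r j => r.set j 1) r) i (m.getD i [])))
      (List.replicate R (List.replicate C 0))
      = pvF (fun i r => if P i then (List.range C).foldl (fun r j => r.set j (0:Int)) r
          else (List.range C).foldl (fun r j => r.set j 1) r) [] R
          (List.replicate R (List.replicate C 0)) := rfl
  rw [hf]
  apply List.ext_getElem?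
  intro i
  rw [pvF_getElem?, List.getElem?_map, List.length_replicate]
  by_cases h : i < R
  · rw [List.getElem?_range h, if_pos ⟨h, h⟩]
    have hgd : (List.replicate R (List.replicate C (0:Int))).getD i [] = List.replicate C 0 := by
      simp [List.getD_eq_getElem?_getD, List.getElem?_replicate, h]
    simp only [hgd]
    by_cases hp : P i
    · simp only [hp, if_true, Option.map_some]
      rw [pvFillRow (0:Int) C _ (by simp)]
    · simp only [hp, if_false, Option.map_some]
      rw [pvFillRow (1:Int) C _ (by simp)]
  · have h2 : ¬ (i < R ∧ i < R) := by omega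
    have hr : (List.range R)[i]? = none := List.getElem?_eq_none (by simpa using Nat.le_of_not_lt h)
    rw [if_neg h2, hr]
    simp [List.getElem?_replicate, h]

theorem raw_stage3 (Q : Nat → Prop) [DecidablePred Q] (R C : Nat) (v : Nat → Int) :
    (List.range C).foldl (fun m j =>
        if Q j then (List.range R).foldl (fun m i => m.set i ((m.getD i []).set j 0)) m else m)
      ((List.range R).map (fun (i : Nat) => List.replicate C (v i)))
      = (List.range R).map (fun (i : Nat) => (List.range C).map (fun (j : Nat) => if Q j then 0 else v i)) := by
  have hin : ∀ (j : Nat) (m : List (List Int)),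
      (List.range R).foldl (fun m i => m.set i ((m.getD i []).set j 0)) m
        = pvF (fun _ r => r.set j 0) [] R m := fun _ _ => rfl
  simp only [hin]
  rw [pvColLoop Q R (List.range C) _ (by simp), List.map_map]
  apply List.map_congr_left
  intro i _
  simp only [Function.comp]
  exact pvColFix Q C (v i)

-- B's clipped one-row pattern, as a range map
theorem pvHitEq (lo hi : Int) (C : Nat) (h0 : 0 ≤ lo) (h1 : lo ≤ hi) (h2 : hi ≤ (C:Int))
    (tc bc : Int)
    (hc : ∀ j : Nat, j < C → ((lo ≤ (j:Int) ∧ (j:Int) < hi) ↔ (tc ≤ (j:Int) ∧ (j:Int) ≤ bc))) :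
    List.replicate lo.toNat (0:Int) ++ List.replicate (hi - lo).toNat 1
        ++ List.replicate ((C:Int) - hi).toNat 0
      = (List.range C).map (fun (j : Nat) => if tc ≤ (j:Int) ∧ (j:Int) ≤ bc then 1 else 0) := by
  apply List.ext_getElem?
  intro k
  rw [List.getElem?_map]
  rw [List.getElem?_append, List.getElem?_append]
  simp only [List.length_replicate, List.length_append, List.getElem?_replicate]
  by_cases hk : k < C
  · rw [List.getElem?_range hk]
    have hcc := hc k hk
    by_cases ha : k < lo.toNat
    · have hne : ¬ (tc ≤ (k:Int) ∧ (k:Int) ≤ bc) := by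
        intro hx
        have := hcc.mpr hx
        omega
      simp [ha, hne]
      omega
    · by_cases hb : k - lo.toNat < (hi - lo).toNat
      · have hyes : tc ≤ (k:Int) ∧ (k:Int) ≤ bc := hcc.mp (by omega)
        have hb' : k < lo.toNat + (hi - lo).toNat := by omega
        simp [ha, hb, hb', hyes]
      · have hne : ¬ (tc ≤ (k:Int) ∧ (k:Int) ≤ bc) := by
          intro hx
          have := hcc.mpr hx
          omega
        have hc2 : k - lo.toNat - (hi - lo).toNat < ((C:Int) - hi).toNat := by omega
        have hb' : ¬ k < lo.toNat + (hi - lo).toNat := by omega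
        simp [ha, hb', hc2, hne]
        omega
  · have hr : (List.range C)[k]? = none := List.getElem?_eq_none (by simpa using Nat.le_of_not_lt hk)
    rw [hr]
    have hka : ¬ k < lo.toNat := by omega
    have hkb : ¬ k < lo.toNat + (hi - lo).toNat := by omega
    have hkc : ¬ k - lo.toNat - (hi - lo).toNat < ((C:Int) - hi).toNat := by omega
    simp [hka, hkb, hkc]
    omega

-- both ports equal this canonical grid
def pvGrid (R C : Nat) (tlr tlc brr brc : Int) : List (List Int) :=
  (List.range R).map (fun (i : Nat) => (List.range C).map (fun (j : Nat) =>
    if (tlr ≤ (i:Int) ∧ (i:Int) ≤ brr) ∧ (tlc ≤ (j:Int) ∧ (j:Int) ≤ brc) then 1 else 0))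

theorem pvGet0 (r0 : List Int) (rest : List (List Int)) :
    PySem.List.pyGet? (r0 :: rest) (0:Int) = some r0 := by
  simp [PySem.List.pyGet?, PySem.List.pyIdx?]

theorem portA_eq (r0 : List Int) (rest : List (List Int)) (tlr tlc brr brc : Int) :
    rectangle_select (r0 :: rest) (tlr, tlc) (brr, brc)
      = pvGrid (r0 :: rest).length r0.length tlr tlc brr brc := by
  unfold rectangle_select
  simp only [pvGet0, Option.getD_some, pvSetCell, PySem.List.pyRange_zero_natCast,
    List.foldl_map, Int.toNat_natCast]
  simp only [pvInnerApp, pvInnerRow, List.length_range]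
  rw [raw_stage0, raw_stage1,
    raw_stage2 (fun (i : Nat) => ¬ (tlr ≤ (i:Int) ∧ (i:Int) < brr + 1)) (r0 :: rest).length r0.length,
    raw_stage3 (fun (j : Nat) => ¬ (tlc ≤ (j:Int) ∧ (j:Int) < brc + 1)) (r0 :: rest).length r0.length
      (fun (i : Nat) => if ¬ (tlr ≤ (i:Int) ∧ (i:Int) < brr + 1) then 0 else 1)]
  unfold pvGrid
  apply List.map_congr_left
  intro i _
  apply List.map_congr_left
  intro j _
  split_ifs <;> omega

theorem portB_eq (r0 : List Int) (rest : List (List Int)) (tlr tlc brr brc : Int) :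
    rectangle_select_alt (r0 :: rest) (tlr, tlc) (brr, brc)
      = pvGrid (r0 :: rest).length r0.length tlr tlc brr brc := by
  unfold rectangle_select_alt
  simp only [pvGet0, Option.getD_some, PySem.List.pyRange_zero_natCast, List.map_map,
    Function.comp]
  unfold pvGrid
  apply List.map_congr_left
  intro i _
  simp only [Function.comp_apply, Int.toNat_natCast]
  by_cases h : tlr ≤ (i:Int) ∧ (i:Int) ≤ brr
  · rw [if_pos h]
    have h0 : (0:Int) ≤ max 0 (min tlc (r0.length:Int)) := le_max_left _ _
    have h1 : max 0 (min tlc (r0.length:Int))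
        ≤ max (max 0 (min tlc (r0.length:Int))) (min (brc+1) (r0.length:Int)) := le_max_left _ _
    have hloC : max 0 (min tlc (r0.length:Int)) ≤ (r0.length:Int) :=
      max_le (Int.natCast_nonneg _) (min_le_right _ _)
    have h2 : max (max 0 (min tlc (r0.length:Int))) (min (brc+1) (r0.length:Int))
        ≤ (r0.length:Int) := max_le hloC (min_le_right _ _)
    have hc : ∀ j : Nat, j < r0.length →
        ((max 0 (min tlc (r0.length:Int)) ≤ (j:Int) ∧
          (j:Int) < max (max 0 (min tlc (r0.length:Int))) (min (brc+1) (r0.length:Int)))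
          ↔ (tlc ≤ (j:Int) ∧ (j:Int) ≤ brc)) := by
      intro j hj
      have hjC : (j:Int) < (r0.length:Int) := by exact_mod_cast hj
      constructor
      · rintro ⟨hl, hh⟩
        have h4 : tlc ≤ (j:Int) := by
          rcases min_le_iff.mp (le_trans (le_max_right _ _) hl) with hx | hx
          · exact hx
          · omega
        refine ⟨h4, ?_⟩
        rcases lt_max_iff.mp hh with h6 | h6
        · exact absurd h6 (not_lt.mpr hl)
        · have := lt_min_iff.mp h6
          omega
      · rintro ⟨h4, h5⟩
        refine ⟨max_le_iff.mpr ⟨Int.natCast_nonneg _, le_trans (min_le_left _ _) h4⟩, ?_⟩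
        exact lt_max_iff.mpr (Or.inr (lt_min_iff.mpr ⟨by omega, hjC⟩))
    rw [pvHitEq _ _ r0.length h0 h1 h2 tlc brc hc]
    apply List.map_congr_left
    intro j _
    by_cases hcj : tlc ≤ (j:Int) ∧ (j:Int) ≤ brc
    · rw [if_pos hcj, if_pos ⟨h, hcj⟩]
    · rw [if_neg hcj, if_neg (by tauto)]
  · rw [if_neg h]
    have : ∀ j ∈ List.range r0.length,
        (if (tlr ≤ (i:Int) ∧ (i:Int) ≤ brr) ∧ (tlc ≤ (j:Int) ∧ (j:Int) ≤ brc) then (1:Int) else 0)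
          = (fun (_ : Nat) => (0:Int)) j := by
      intro j _
      simp [h]
    rw [List.map_congr_left this, List.map_const', List.length_range]

-- ===== VERDICT (by name: the statement is the Claim_ definition above) =====
theorem rectangle_select_spec : Claim_equal_rectangle_select := by
  intro image topleft bottomright _ hpre
  unfold Spec_rectangle_select
  match image, hpre with
  | r0 :: rest, _ =>
    obtain ⟨tlr, tlc⟩ := topleft
    obtain ⟨brr, brc⟩ := bottomright
    rw [portA_eq, portB_eq]
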